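-- pv_equiv track=rewrite | github.com/Airacobra/Python-Fourth-Semester | 7.OperacjeNaPlikach/doZadania5.py | r_fun
-- ===== SOURCE A (Python) =====
-- def r_fun(l):
-- 	counter = 0
-- 	for number in l:
-- 		if number:
-- 			if counter:
-- 				yield counter
-- 				counter = 0
-- 		else:
-- 			counter += 1
-- ===== SOURCE B (Python) =====
-- def r_fun(l):
--     # Pass 1: build run-length groups [truthiness, length].
--     groups = []
--     for x in l:
--         k = bool(x)
--         if groups and groups[-1][0] == k:
--             groups[-1][1] += 1
--         else:
--             groups.append([k, 1])
--     # Pass 2: emit lengths of falsy groups, skipping the final group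
--     # (a trailing falsy run is never emitted).
--     for k, n in groups[:-1]:
--         if not k:
--             yield n
-- ===== Notes on version B (the rewrite author's own statement) =====
-- stated objective: idiomatic
-- what changed: B replaces A's inline counter-with-flush loop by a table-then-scan decomposition: one pass builds the list of (truthiness, run-length) groups, a second pass yields the lengths of the falsy groups excluding the final group.
import Mathlib
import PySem

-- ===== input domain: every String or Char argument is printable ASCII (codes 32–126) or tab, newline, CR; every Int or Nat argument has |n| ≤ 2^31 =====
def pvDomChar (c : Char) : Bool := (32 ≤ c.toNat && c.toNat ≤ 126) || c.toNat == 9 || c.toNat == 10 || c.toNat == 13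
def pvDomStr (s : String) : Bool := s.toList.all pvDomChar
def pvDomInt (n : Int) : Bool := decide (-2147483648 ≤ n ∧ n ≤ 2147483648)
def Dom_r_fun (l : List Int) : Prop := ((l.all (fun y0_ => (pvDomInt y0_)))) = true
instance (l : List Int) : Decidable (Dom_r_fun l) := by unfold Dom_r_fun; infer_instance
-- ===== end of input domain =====

-- B replaces A's inline counter-with-flush loop by a table-then-scan decomposition
-- (build run-length groups first, then emit falsy run lengths skipping the final group); idiomatic, not faster.

-- ===== PORT A =====
-- A: counter of current falsy run, flushed (yielded) when a truthy value arrives.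
def r_fun (l : List Int) : List Int :=
  (l.foldl (fun (st : Int × List Int) number =>
      if number ≠ 0 then
        (if st.1 ≠ 0 then (0, st.2 ++ [st.1]) else st)
      else
        (st.1 + 1, st.2)) (0, [])).2

-- ===== PORT B =====
-- B pass 1 step: extend the last group if its key matches, else append a new group.
def pvAddTo : List (Bool × Int) → Bool → List (Bool × Int)
  | [], k => [(k, 1)]
  | [(k0, n)], k => if k0 == k then [(k0, n + 1)] else [(k0, n), (k, 1)]
  | g :: gs, k => g :: pvAddTo gs k

def r_fun_alt (l : List Int) : List Int :=
  let groups := l.foldl (fun gs x => pvAddTo gs (decide (x ≠ 0))) []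
  groups.dropLast.foldl (fun out kn => if kn.1 then out else out ++ [kn.2]) []

-- ===== PRECONDITION & SPEC =====
def Spec_r_fun (l : List Int) (out : List Int) : Prop := out = r_fun_alt l
instance (l : List Int) (out : List Int) : Decidable (Spec_r_fun l out) := by unfold Spec_r_fun; infer_instance

-- ===== CLAIM (what is proved, stated in full; the proofs are below) =====
def Claim_equal_r_fun : Prop := ∀ (l : List Int), Dom_r_fun l → Spec_r_fun l (r_fun l)

-- ===== LEMMAS AND PROOFS =====

-- length of the last group if it is falsy, else 0 (A's counter)
def pvLfl (gs : List (Bool × Int)) : Int :=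
  match gs.getLast? with
  | some (false, n) => n
  | _ => 0

-- B's second loop from the empty accumulator
def pvEmit (gs : List (Bool × Int)) : List Int :=
  gs.foldl (fun out kn => if kn.1 then out else out ++ [kn.2]) []

theorem pvEmit_acc (gs : List (Bool × Int)) :
    ∀ acc, gs.foldl (fun out kn => if kn.1 then out else out ++ [kn.2]) acc
      = acc ++ pvEmit gs := by
  induction gs with
  | nil => intro acc; simp [pvEmit]
  | cons g gs ih =>
    intro acc
    simp only [pvEmit, List.foldl_cons]
    rw [ih (if g.1 then acc else acc ++ [g.2]), ih (if g.1 then [] else [] ++ [g.2])]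
    cases g.1 <;> simp

theorem pvEmit_append (xs ys : List (Bool × Int)) :
    pvEmit (xs ++ ys) = pvEmit xs ++ pvEmit ys := by
  simp only [pvEmit, List.foldl_append]
  rw [pvEmit_acc ys (xs.foldl _ [])]
  rfl

theorem pvAddTo_concat (ys : List (Bool × Int)) (k0 : Bool) (n : Int) (k : Bool) :
    pvAddTo (ys ++ [(k0, n)]) k
      = if k0 == k then ys ++ [(k0, n + 1)] else ys ++ [(k0, n), (k, 1)] := by
  induction ys with
  | nil => cases h : (k0 == k) <;> simp [pvAddTo, h]
  | cons y ys ih =>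
    cases ys with
    | nil =>
      cases h : (k0 == k) <;> simp [pvAddTo, h]
    | cons z zs =>
      simp only [List.cons_append, pvAddTo]
      rw [← List.cons_append, ih]
      cases h : (k0 == k) <;> simp [h]

-- all run lengths are positive
def pvPos (gs : List (Bool × Int)) : Prop := ∀ p ∈ gs, 0 < p.2

theorem pvPos_addTo (gs : List (Bool × Int)) (k : Bool) (h : pvPos gs) :
    pvPos (pvAddTo gs k) := by
  induction gs with
  | nil => intro p hp; simp [pvAddTo] at hp; simp [hp]
  | cons g gs ih =>
    cases gs with
    | nil =>
      obtain ⟨k0, n⟩ := g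
      have hn : 0 < n := h (k0, n) (by simp)
      intro p hp
      simp only [pvAddTo] at hp
      split at hp
      · simp at hp
        simp [hp]; omega
      · simp at hp
        rcases hp with hp | hp
        · simp [hp]; omega
        · simp [hp]
    | cons z zs =>
      intro p hp
      simp only [pvAddTo] at hp
      rcases (List.mem_cons).1 hp with hp | hp
      · exact hp ▸ h g (by simp)
      · exact ih (fun q hq => h q (List.mem_cons_of_mem _ hq)) p hp

-- the key step: A's loop body tracks B's group table
theorem pv_step (gs : List (Bool × Int)) (x : Int) (hpos : pvPos gs) :
    (if x ≠ 0 then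
        (if pvLfl gs ≠ 0 then ((0 : Int), pvEmit gs.dropLast ++ [pvLfl gs])
         else (pvLfl gs, pvEmit gs.dropLast))
      else (pvLfl gs + 1, pvEmit gs.dropLast))
    = (pvLfl (pvAddTo gs (decide (x ≠ 0))),
       pvEmit (pvAddTo gs (decide (x ≠ 0))).dropLast) := by
  rcases List.eq_nil_or_concat gs with hnil | ⟨ys, ⟨k0, n⟩, rfl⟩
  · subst hnil
    by_cases hx : x = 0 <;> simp [hx, pvAddTo, pvLfl, pvEmit]
  · simp only [List.concat_eq_append] at hpos ⊢
    have hn : 0 < n := hpos (k0, n) (by simp)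
    have hlast : pvLfl (ys ++ [(k0, n)]) = if k0 then 0 else n := by
      cases k0 <;> simp [pvLfl]
    by_cases hx : x = 0
    · -- falsy x
      subst hx
      simp only [ne_eq, not_true_eq_false, if_false, decide_false]  -- x ≠ 0 is False
      rw [pvAddTo_concat]
      cases k0
      · simp [pvLfl]
      · simp [pvLfl, pvEmit_append, pvEmit]
    · -- truthy x
      have hx' : (decide (x ≠ 0)) = true := by simp [hx]
      simp only [if_pos hx, hx']
      rw [pvAddTo_concat]
      cases k0
      · -- last group falsy, counter = n ≠ 0: flush
        have hne : pvLfl (ys ++ [(false, n)]) ≠ 0 := by rw [hlast]; simp; omega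
        rw [if_pos hne, hlast]
        simp [pvLfl, pvEmit]
      · -- last group truthy, counter = 0: nothing
        simp [pvLfl]

theorem pv_inv (l : List Int) : ∀ gs : List (Bool × Int), pvPos gs →
    l.foldl (fun (st : Int × List Int) number =>
      if number ≠ 0 then
        (if st.1 ≠ 0 then (0, st.2 ++ [st.1]) else st)
      else (st.1 + 1, st.2)) (pvLfl gs, pvEmit gs.dropLast)
    = (pvLfl (l.foldl (fun gs x => pvAddTo gs (decide (x ≠ 0))) gs),
       pvEmit (l.foldl (fun gs x => pvAddTo gs (decide (x ≠ 0))) gs).dropLast) := by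
  induction l with
  | nil => intro gs _; simp
  | cons x l ih =>
    intro gs hpos
    simp only [List.foldl_cons]
    rw [show (if x ≠ 0 then
        (if pvLfl gs ≠ 0 then ((0 : Int), pvEmit gs.dropLast ++ [pvLfl gs])
         else (pvLfl gs, pvEmit gs.dropLast))
      else (pvLfl gs + 1, pvEmit gs.dropLast))
      = (pvLfl (pvAddTo gs (decide (x ≠ 0))),
         pvEmit (pvAddTo gs (decide (x ≠ 0))).dropLast) from pv_step gs x hpos]
    exact ih _ (pvPos_addTo gs _ hpos)

-- ===== VERDICT (by name: the statement is the Claim_ definition above) =====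
theorem r_fun_spec : Claim_equal_r_fun := by
  intro l _
  show r_fun l = r_fun_alt l
  unfold r_fun r_fun_alt
  have h := pv_inv l [] (by intro p hp; simp at hp)
  simp only [pvLfl, pvEmit, List.getLast?_nil, List.dropLast_nil, List.foldl_nil] at h
  rw [h]
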